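-- pv_equiv track=rewrite | github.com/SorontarX10/weekly-seo-agent | weekly_seo_agent/weekly_reporting_agent/workflow.py | _compose_final_report
-- ===== SOURCE A (Python) =====
-- def _extract_markdown_section(markdown: str, header: str) -> str:
--     lines = markdown.splitlines()
--     target = f"## {header}".strip().lower()
--     start_index: int | None = None
--     for idx, line in enumerate(lines):
--         if line.strip().lower() == target:
--             start_index = idx + 1
--             break
--     if start_index is None:
--         return ""
--
--     out: list[str] = []
--     for line in lines[start_index:]:
--         stripped = line.strip()
--         if stripped.startswith("## "):
--             break
--         out.append(line)
--
--     return "\n".join(out).strip()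
--
-- def _compose_final_report(markdown_report: str, commentary: str) -> str:
--     leadership_snapshot = _extract_markdown_section(markdown_report, "Leadership snapshot")
--     executive_summary = _extract_markdown_section(markdown_report, "Executive summary")
--     baseline_narrative = _extract_markdown_section(markdown_report, "What is happening and why")
--     leadership_snapshot_block = ""
--     if leadership_snapshot:
--         leadership_snapshot_block = (
--             "## Leadership Snapshot\n"
--             f"{leadership_snapshot}\n\n"
--         )
--     executive_summary_block = ""
--     if executive_summary:
--         executive_summary_block = (
--             "## Executive Summary\n"
--             f"{executive_summary}\n\n"
--         )
--
--     report_title_line = next(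
--         (line for line in markdown_report.splitlines() if line.startswith("# ")),
--         "# Weekly SEO Intelligence Report",
--     )
--     return (
--         f"{report_title_line}\n\n"
--         f"{leadership_snapshot_block}"
--         f"{executive_summary_block}"
--         "## Narrative Analysis\n"
--         f"{commentary.strip()}\n\n"
--         "### Source Baseline Narrative (for traceability)\n"
--         f"{baseline_narrative.strip() or '- Baseline narrative section not available.'}\n"
--     )
-- ===== SOURCE B (Python) =====
-- def _compose_final_report(markdown_report: str, commentary: str) -> str:
--     # One pass: index all h2 sections (first occurrence wins via first-match lookup)
--     # and find the title line, instead of A's three full rescans.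
--     sections = []  # list of (lowercased stripped header line, content lines)
--     key = None
--     buf = []
--     title = None
--     for line in markdown_report.splitlines():
--         stripped = line.strip()
--         if stripped.startswith("## "):
--             if key is not None:
--                 sections.append((key, buf))
--             key = stripped.lower()
--             buf = []
--         elif key is not None:
--             buf.append(line)
--         if title is None and line.startswith("# "):
--             title = line
--     if key is not None:
--         sections.append((key, buf))
--
--     def section(header: str) -> str:
--         want = "## " + header.lower()
--         for k, content in sections:
--             if k == want:
--                 return "\n".join(content).strip()
--         return ""
--
--     leadership_snapshot = section("Leadership snapshot")
--     executive_summary = section("Executive summary")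
--     baseline_narrative = section("What is happening and why")
--
--     parts = [title if title is not None else "# Weekly SEO Intelligence Report", ""]
--     if leadership_snapshot:
--         parts += ["## Leadership Snapshot", leadership_snapshot, ""]
--     if executive_summary:
--         parts += ["## Executive Summary", executive_summary, ""]
--     parts += ["## Narrative Analysis", commentary.strip(), "",
--               "### Source Baseline Narrative (for traceability)",
--               baseline_narrative.strip() or "- Baseline narrative section not available.", ""]
--     return "\n".join(parts)
-- ===== Notes on version B (the rewrite author's own statement) =====
-- stated objective: alternative
-- what changed: B makes a single pass over the lines, building an ordered index of all h2 sections (first-match lookup keeps A's first-occurrence semantics) while also picking up the title line, then assembles the report from index lookups and one '\n'.join, instead of A's three independent full scans for sections plus a fourth scan for the title.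
import Mathlib
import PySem

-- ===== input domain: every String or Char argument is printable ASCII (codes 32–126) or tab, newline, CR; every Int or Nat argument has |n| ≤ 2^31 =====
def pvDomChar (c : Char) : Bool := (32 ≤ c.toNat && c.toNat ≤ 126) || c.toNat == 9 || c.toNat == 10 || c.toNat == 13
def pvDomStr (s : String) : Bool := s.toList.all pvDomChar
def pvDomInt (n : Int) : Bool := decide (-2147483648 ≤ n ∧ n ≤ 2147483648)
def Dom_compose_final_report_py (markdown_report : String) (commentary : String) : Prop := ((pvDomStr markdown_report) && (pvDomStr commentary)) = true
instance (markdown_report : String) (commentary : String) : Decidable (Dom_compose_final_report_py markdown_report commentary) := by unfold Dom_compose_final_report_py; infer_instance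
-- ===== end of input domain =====

-- B replaces A's three full rescans of the markdown by a single pass that indexes all
-- h2 sections (first occurrence wins) and finds the title line, then assembles by lookup;
-- objective: alternative single-pass structure.


-- ===== PORT A =====
-- line.strip().lower()
def pvStripLower (l : List Char) : List Char := PySem.Chars.lower (PySem.Chars.strip l)

-- A's first loop ('for idx, line in enumerate(lines): … break') fused with the
-- 'lines[start_index:]' slice: returns the suffix after the first matching header line.
def pvFindStart (target : List Char) : List (List Char) → Option (List (List Char))
  | [] => none
  | l :: ls => if pvStripLower l = target then some ls else pvFindStart target ls

-- A's second loop: collect lines until one whose stripped form starts with "## "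
def pvCollect : List (List Char) → List (List Char)
  | [] => []
  | l :: ls =>
    if PySem.Chars.startswith (PySem.Chars.strip l) "## ".toList then []
    else l :: pvCollect ls

-- _extract_markdown_section (target already computed as f"## {header}".strip().lower())
def pvExtract (lines : List (List Char)) (target : List Char) : List Char :=
  match pvFindStart target lines with
  | none => []
  | some rest => PySem.Chars.strip (PySem.Chars.join ['\n'] (pvCollect rest))

-- next((line for line in … if line.startswith("# ")), default)
def pvFindTitle : List (List Char) → Option (List Char)
  | [] => none
  | l :: ls => if PySem.Chars.startswith l "# ".toList then some l else pvFindTitle ls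

def compose_final_report_py (markdown_report : String) (commentary : String) : String :=
  let lines := PySem.Chars.splitlines markdown_report.toList
  let leadership_snapshot := pvExtract lines (pvStripLower "## Leadership snapshot".toList)
  let executive_summary := pvExtract lines (pvStripLower "## Executive summary".toList)
  let baseline_narrative := pvExtract lines (pvStripLower "## What is happening and why".toList)
  let leadership_snapshot_block :=
    if leadership_snapshot = [] then []
    else "## Leadership Snapshot\n".toList ++ leadership_snapshot ++ "\n\n".toList
  let executive_summary_block :=
    if executive_summary = [] then []
    else "## Executive Summary\n".toList ++ executive_summary ++ "\n\n".toList
  let report_title_line :=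
    match pvFindTitle lines with
    | some t => t
    | none => "# Weekly SEO Intelligence Report".toList
  let baseline_tail :=
    if PySem.Chars.strip baseline_narrative = [] then
      "- Baseline narrative section not available.".toList
    else PySem.Chars.strip baseline_narrative
  String.ofList (report_title_line ++ "\n\n".toList ++ leadership_snapshot_block ++
    executive_summary_block ++ "## Narrative Analysis\n".toList ++
    PySem.Chars.strip commentary.toList ++ "\n\n".toList ++
    "### Source Baseline Narrative (for traceability)\n".toList ++ baseline_tail ++ ['\n'])

-- ===== PORT B =====
-- B's single loop, state: (sections so far, current section key, current buffer, title line).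
def pvBLoop : List (List Char) → List (List Char × List (List Char)) →
    Option (List Char) → List (List Char) → Option (List Char) →
    (List (List Char × List (List Char)) × Option (List Char))
  | [], secs, key, buf, title =>
    ((match key with | some k => secs ++ [(k, buf)] | none => secs), title)
  | l :: rest, secs, key, buf, title =>
    let s := PySem.Chars.strip l
    let st :=
      if PySem.Chars.startswith s "## ".toList then
        ((match key with | some k => secs ++ [(k, buf)] | none => secs),
          some (PySem.Chars.lower s), ([] : List (List Char)))
      else
        match key with
        | some k => (secs, some k, buf ++ [l])
        | none => (secs, none, buf)
    let title' :=
      match title with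
      | some t => some t
      | none => if PySem.Chars.startswith l "# ".toList then some l else none
    pvBLoop rest st.1 st.2.1 st.2.2 title'

-- B's section(): first-match lookup in the index, '\n'.join(content).strip()
def pvLookup (want : List Char) : List (List Char × List (List Char)) → List Char
  | [] => []
  | (k, content) :: rest =>
    if k = want then PySem.Chars.strip (PySem.Chars.join ['\n'] content)
    else pvLookup want rest

def compose_final_report_py_alt (markdown_report : String) (commentary : String) : String :=
  let lines := PySem.Chars.splitlines markdown_report.toList
  let st := pvBLoop lines [] none [] none
  let leadership_snapshot := pvLookup ("## ".toList ++ PySem.Chars.lower "Leadership snapshot".toList) st.1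
  let executive_summary := pvLookup ("## ".toList ++ PySem.Chars.lower "Executive summary".toList) st.1
  let baseline_narrative := pvLookup ("## ".toList ++ PySem.Chars.lower "What is happening and why".toList) st.1
  let title :=
    match st.2 with
    | some t => t
    | none => "# Weekly SEO Intelligence Report".toList
  let parts₀ := [title, []]
  let parts₁ :=
    if leadership_snapshot = [] then parts₀
    else parts₀ ++ ["## Leadership Snapshot".toList, leadership_snapshot, []]
  let parts₂ :=
    if executive_summary = [] then parts₁
    else parts₁ ++ ["## Executive Summary".toList, executive_summary, []]
  let parts := parts₂ ++ ["## Narrative Analysis".toList, PySem.Chars.strip commentary.toList, [],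
    "### Source Baseline Narrative (for traceability)".toList,
    (if PySem.Chars.strip baseline_narrative = [] then
      "- Baseline narrative section not available.".toList
     else PySem.Chars.strip baseline_narrative), []]
  String.ofList (PySem.Chars.join ['\n'] parts)

-- ===== PRECONDITION & SPEC =====
def Spec_compose_final_report_py (markdown_report : String) (commentary : String) (out : String) : Prop := out = compose_final_report_py_alt markdown_report commentary
instance (markdown_report : String) (commentary : String) (out : String) : Decidable (Spec_compose_final_report_py markdown_report commentary out) := by unfold Spec_compose_final_report_py; infer_instance

-- ===== CLAIM (what is proved, stated in full; the proofs are below) =====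
def Claim_equal_compose_final_report_py : Prop := ∀ (markdown_report : String) (commentary : String), Dom_compose_final_report_py markdown_report commentary → Spec_compose_final_report_py markdown_report commentary (compose_final_report_py markdown_report commentary)

-- ===== LEMMAS AND PROOFS =====

-- pure recursive characterisation of the section part of pvBLoop's state machine
def pvSecs : List (List Char) → Option (List Char) → List (List Char) →
    List (List Char × List (List Char))
  | [], none, _ => []
  | [], some k, buf => [(k, buf)]
  | l :: ls, key, buf =>
    let s := PySem.Chars.strip l
    if PySem.Chars.startswith s ['#', '#', ' '] then
      (match key with | some k => [(k, buf)] | none => []) ++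
        pvSecs ls (some (PySem.Chars.lower s)) []
    else
      match key with
      | some k => pvSecs ls (some k) (buf ++ [l])
      | none => pvSecs ls none buf

theorem pvBLoop_spec (L : List (List Char)) : ∀ secs key buf title,
    pvBLoop L secs key buf title =
      (secs ++ pvSecs L key buf,
       match title with | some t => some t | none => pvFindTitle L) := by
  induction L with
  | nil =>
    intro secs key buf title
    cases key <;> cases title <;> simp [pvBLoop, pvSecs, pvFindTitle]
  | cons l ls ih =>
    intro secs key buf title
    simp only [pvBLoop, pvSecs, pvFindTitle]
    by_cases h : PySem.Chars.startswith (PySem.Chars.strip l) ['#', '#', ' '] = true <;>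
    by_cases h2 : PySem.Chars.startswith l ['#', ' '] = true <;>
    cases key <;> cases title <;>
      simp [h, h2, ih, List.append_assoc]
theorem lowerChar_fix (c : Char) (d : Char) (hd : d.toNat < 65) :
    PySem.Chars.lowerChar c = d ↔ c = d := by
  unfold PySem.Chars.lowerChar PySem.Chars.isupper
  split_ifs with h
  · rw [Bool.and_eq_true, decide_eq_true_eq, decide_eq_true_eq] at h
    obtain ⟨h1, h2⟩ := h
    have hA : 65 ≤ c.toNat := h1
    have hZ : c.toNat ≤ 90 := h2
    have ht : (Char.ofNat (c.toNat + 32)).toNat = c.toNat + 32 := by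
      rw [Char.toNat_ofNat]
      have : (c.toNat + 32).isValidChar := by
        left; omega
      simp [this]
    constructor
    · intro he
      exfalso
      have := congrArg Char.toNat he
      rw [ht] at this
      omega
    · intro he
      exfalso
      subst he
      omega
  · exact Iff.rfl
theorem startswith_lower (cs : List Char) :
    PySem.Chars.startswith (PySem.Chars.lower cs) ['#', '#', ' '] =
      PySem.Chars.startswith cs ['#', '#', ' '] := by
  match cs with
  | [] => rfl
  | [a] => simp [PySem.Chars.startswith, PySem.Chars.lower, List.isPrefixOf]
  | [a, b] => simp [PySem.Chars.startswith, PySem.Chars.lower, List.isPrefixOf]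
  | a :: b :: c :: rest =>
    simp only [PySem.Chars.startswith, PySem.Chars.lower, List.map, List.isPrefixOf]
    rw [Bool.eq_iff_iff]
    simp only [Bool.and_eq_true, beq_iff_eq, and_true]
    constructor
    · rintro ⟨h1, h2, h3⟩
      exact ⟨((lowerChar_fix a '#' (by decide)).mp h1.symm).symm,
        ((lowerChar_fix b '#' (by decide)).mp h2.symm).symm,
        ((lowerChar_fix c ' ' (by decide)).mp h3.symm).symm⟩
    · rintro ⟨h1, h2, h3⟩
      rw [← h1, ← h2, ← h3]
      decide
theorem pvLookup_head (t : List Char) : ∀ (ls buf : List (List Char)),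
    pvLookup t (pvSecs ls (some t) buf) =
      PySem.Chars.strip (PySem.Chars.join ['\n'] (buf ++ pvCollect ls)) := by
  intro ls
  induction ls with
  | nil => intro buf; simp [pvSecs, pvLookup, pvCollect]
  | cons l ls ih =>
    intro buf
    simp only [pvSecs, pvCollect]
    by_cases h : PySem.Chars.startswith (PySem.Chars.strip l) ['#', '#', ' '] = true
    · simp [h, pvLookup]
    · simp [h, ih, List.append_assoc]

theorem pvLookup_extract (t : List Char)
    (ht : PySem.Chars.startswith t ['#', '#', ' '] = true) :
    ∀ (ls : List (List Char)) (key : Option (List Char)) (buf : List (List Char)),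
    (key = none ∨ ∃ k, key = some k ∧ k ≠ t) →
    pvLookup t (pvSecs ls key buf) = pvExtract ls t := by
  intro ls
  induction ls with
  | nil =>
    rintro key buf (rfl | ⟨k, rfl, hk⟩) <;> simp [pvSecs, pvLookup, pvExtract, pvFindStart, *]
  | cons l ls ih =>
    intro key buf hkey
    by_cases h : PySem.Chars.startswith (PySem.Chars.strip l) ['#', '#', ' '] = true
    · by_cases hm : PySem.Chars.lower (PySem.Chars.strip l) = t
      · -- header line matching the target
        have hA : pvExtract (l :: ls) t =
            PySem.Chars.strip (PySem.Chars.join ['\n'] (pvCollect ls)) := by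
          simp [pvExtract, pvFindStart, pvStripLower, hm]
        rw [hA]
        have hB : pvLookup t (pvSecs (l :: ls) key buf) =
            pvLookup t (pvSecs ls (some t) []) := by
          rcases hkey with rfl | ⟨k, rfl, hk⟩
          · simp [pvSecs, h, hm]
          · simp [pvSecs, h, hm, pvLookup, hk]
        rw [hB, pvLookup_head]
        simp
      · -- header line not matching
        have hA : pvExtract (l :: ls) t = pvExtract ls t := by
          simp [pvExtract, pvFindStart, pvStripLower, hm]
        rw [hA]
        have hB : pvLookup t (pvSecs (l :: ls) key buf) =
            pvLookup t (pvSecs ls (some (PySem.Chars.lower (PySem.Chars.strip l))) []) := by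
          rcases hkey with rfl | ⟨k, rfl, hk⟩
          · simp [pvSecs, h]
          · simp [pvSecs, h, pvLookup, hk]
        rw [hB, ih _ _ (Or.inr ⟨_, rfl, hm⟩)]
    · -- ordinary content line: cannot match the target
      have hnm : pvStripLower l ≠ t := by
        intro he
        apply h
        have : PySem.Chars.startswith (pvStripLower l) ['#', '#', ' '] = true := he ▸ ht
        rwa [pvStripLower, startswith_lower] at this
      have hA : pvExtract (l :: ls) t = pvExtract ls t := by
        simp [pvExtract, pvFindStart, hnm]
      rw [hA]
      rcases hkey with rfl | ⟨k, rfl, hk⟩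
      · simp only [pvSecs, if_neg h]
        exact ih _ _ (Or.inl rfl)
      · simp only [pvSecs, if_neg h]
        exact ih _ _ (Or.inr ⟨k, rfl, hk⟩)

-- ===== VERDICT (by name: the statement is the Claim_ definition above) =====
set_option maxHeartbeats 2000000 in
theorem compose_final_report_py_spec : Claim_equal_compose_final_report_py := by
  intro md com _
  unfold Spec_compose_final_report_py compose_final_report_py compose_final_report_py_alt
  dsimp only
  rw [pvBLoop_spec]
  simp only [List.nil_append]
  rw [pvLookup_extract _ (by decide) _ _ _ (Or.inl rfl),
      pvLookup_extract _ (by decide) _ _ _ (Or.inl rfl),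
      pvLookup_extract _ (by decide) _ _ _ (Or.inl rfl)]
  have e1 : ("## ".toList ++ PySem.Chars.lower "Leadership snapshot".toList) =
      pvStripLower "## Leadership snapshot".toList := by decide
  have e2 : ("## ".toList ++ PySem.Chars.lower "Executive summary".toList) =
      pvStripLower "## Executive summary".toList := by decide
  have e3 : ("## ".toList ++ PySem.Chars.lower "What is happening and why".toList) =
      pvStripLower "## What is happening and why".toList := by decide
  rw [e1, e2, e3]
  set L := PySem.Chars.splitlines md.toList with hL
  set ls := pvExtract L (pvStripLower "## Leadership snapshot".toList) with hls
  set es := pvExtract L (pvStripLower "## Executive summary".toList) with hes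
  set bn := pvExtract L (pvStripLower "## What is happening and why".toList) with hbn
  congr 1
  by_cases h1 : ls = [] <;> by_cases h2 : es = [] <;>
    cases pvFindTitle L <;>
    simp [h1, h2, PySem.Chars.join_cons_cons, PySem.Chars.join_singleton, List.append_assoc]
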